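-- pv_equiv track=rewrite | github.com/kryl-off/spbu-algorithms-and-data-structures-3sem | 4sem/laba1.py | modified_nearest_neighbor_two_step
-- ===== SOURCE A (Python) =====
-- NO_EDGE = 9999
--
-- def nearest_neighbor_two_step(graph, start=0, NO_EDGE=NO_EDGE):
--     n = len(graph)
--     visited = [False] * n
--     path = [start]
--     visited[start] = True
--     total_cost = 0
--     current = start
--     for step in range(n - 1):
--         candidate = None
--         best_value = float('inf')
--         chosen_cost = None
--         for j in range(n):
--             if not visited[j] and graph[current][j] != NO_EDGE:
--                 cost_current_to_j = graph[current][j]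
--                 remaining = [k for k in range(n) if not visited[k] and k != j]
--                 if remaining:
--                     valid_costs = [graph[j][k] for k in remaining if graph[j][k] != NO_EDGE]
--                     cost_lookahead = min(valid_costs) if valid_costs else NO_EDGE
--                     candidate_value = cost_current_to_j + cost_lookahead
--                 else:
--                     candidate_value = cost_current_to_j
--                 if candidate_value < best_value:
--                     best_value = candidate_value
--                     candidate = j
--                     chosen_cost = cost_current_to_j
--         if candidate is None:
--             return path, None
--         path.append(candidate)
--         visited[candidate] = True
--         total_cost += chosen_cost
--         current = candidate
--     if graph[current][start] == NO_EDGE: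
--         return path, None
--     total_cost += graph[current][start]
--     path.append(start)
--     return path, total_cost
--
-- def modified_nearest_neighbor_two_step(graph, NO_EDGE=NO_EDGE):
--     best_path = None
--     best_total = None
--     n = len(graph)
--     for start in range(n):
--         path, total_cost = nearest_neighbor_two_step(graph, start, NO_EDGE)
--         if total_cost is not None and (best_total is None or total_cost < best_total):
--             best_path = path
--             best_total = total_cost
--     return best_path, best_total
-- ===== SOURCE B (Python) =====
-- NO_EDGE = 9999
--
-- def _tour(graph, NO_EDGE, start, cur, unvisited):
--     # Recursive: consume the (increasing) list of unvisited nodes; None = dead end.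
--     if not unvisited:
--         w = graph[cur][start]
--         return ([start], w) if w != NO_EDGE else None
--     cands = []
--     for j in unvisited:
--         w = graph[cur][j]
--         if w != NO_EDGE:
--             if len(unvisited) == 1:
--                 value = w
--             else:
--                 vals = [graph[j][k] for k in unvisited
--                         if k != j and graph[j][k] != NO_EDGE]
--                 value = w + min(vals, default=NO_EDGE)
--             cands.append((value, j))
--     if not cands:
--         return None
--     _, j = min(cands, key=lambda c: c[0])
--     rest = _tour(graph, NO_EDGE, start, j, [k for k in unvisited if k != j])
--     if rest is None:
--         return None
--     p, t = rest
--     return [j] + p, graph[cur][j] + t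
--
-- def modified_nearest_neighbor_two_step(graph, NO_EDGE=NO_EDGE):
--     n = len(graph)
--     results = []
--     for start in range(n):
--         r = _tour(graph, NO_EDGE, start, start, [j for j in range(n) if j != start])
--         if r is not None:
--             p, t = r
--             results.append((t, [start] + p))
--     if not results:
--         return None, None
--     t, p = min(results, key=lambda c: c[0])
--     return p, t
-- ===== Notes on version B (the rewrite author's own statement) =====
-- stated objective: alternative
-- what changed: A walks a boolean visited array for n-1 steps per start and keeps running best-candidate/best-total accumulators with strict-less updates; B recurses on an explicit shrinking list of unvisited nodes, builds each step's (value, node) candidate list and picks min(..., key) from it, collects per-start (total, path) results in a list and returns min over it, building paths by cons instead of append.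
-- outside the precondition, e.g. on modified_nearest_neighbor_two_step([[0, 0], [0]], 9999): A returns ([0, 1, 0], 0), B returns ([0, 1, 0], 0)
import Mathlib
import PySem

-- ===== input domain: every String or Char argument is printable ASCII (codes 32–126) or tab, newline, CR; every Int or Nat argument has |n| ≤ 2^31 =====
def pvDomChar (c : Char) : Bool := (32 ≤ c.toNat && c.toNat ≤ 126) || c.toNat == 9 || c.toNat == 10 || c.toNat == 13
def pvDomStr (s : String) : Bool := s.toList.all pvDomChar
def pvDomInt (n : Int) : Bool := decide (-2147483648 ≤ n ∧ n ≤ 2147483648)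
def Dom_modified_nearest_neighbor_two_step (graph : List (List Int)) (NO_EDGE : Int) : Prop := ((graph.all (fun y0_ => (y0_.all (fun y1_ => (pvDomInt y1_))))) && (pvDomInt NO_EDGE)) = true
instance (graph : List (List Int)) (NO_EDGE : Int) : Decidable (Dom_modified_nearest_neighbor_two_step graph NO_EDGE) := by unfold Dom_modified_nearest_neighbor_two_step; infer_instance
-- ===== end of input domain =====

-- B rebuilds the heuristic as a recursion over the explicit list of unvisited nodes
-- (candidate list + first-min selection, results list + first-min over starts),
-- replacing A's boolean-visited array, step loop and running best accumulators
-- (objective: alternative decomposition, same cost).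

-- graph[i][j] for in-range indices (out-of-range raises in Python and is excluded by Pre_)
def pvG (graph : List (List Int)) (i j : Nat) : Int := (graph.getD i []).getD j 0

-- ===== PORT A =====
-- inner selection loop of nearest_neighbor_two_step: (candidate, best_value, chosen_cost)
def pvSelA (graph : List (List Int)) (NO_EDGE : Int) (n : Nat) (visited : List Bool)
    (current : Nat) : Option Nat × Option Int × Option Int :=
  (List.range n).foldl (fun acc j =>
    if !(visited.getD j false) && (pvG graph current j != NO_EDGE) then
      let cost := pvG graph current j
      let remaining := (List.range n).filter (fun k => !(visited.getD k false) && (k != j))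
      let cv :=
        if remaining = [] then cost
        else
          let valid := (remaining.filter (fun k => pvG graph j k != NO_EDGE)).map
            (fun k => pvG graph j k)
          cost + (PySem.List.min? valid (fun x => x)).getD NO_EDGE
      match acc.2.1 with
      | none => (some j, some cv, some cost)
      | some b => if cv < b then (some j, some cv, some cost) else acc
    else acc) (none, none, none)

-- loop state: inl = still walking (visited, path, total, current); inr = early 'return path, None'
def pvStepA (graph : List (List Int)) (NO_EDGE : Int) (n : Nat)
    (s : (List Bool × List Int × Int × Nat) ⊕ List Int) (_ : Nat) :
    (List Bool × List Int × Int × Nat) ⊕ List Int :=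
  match s with
  | .inr p => .inr p
  | .inl (visited, path, total, current) =>
    match pvSelA graph NO_EDGE n visited current with
    | (none, _, _) => .inr path
    | (some c, _, cc) => .inl (visited.set c true, path ++ [(c : Int)], total + cc.getD 0, c)

def pvNnA (graph : List (List Int)) (start : Nat) (NO_EDGE : Int) : List Int × Option Int :=
  let n := graph.length
  match (List.range (n - 1)).foldl (pvStepA graph NO_EDGE n)
      (.inl ((List.replicate n false).set start true, [(start : Int)], 0, start)) with
  | .inr p => (p, none)
  | .inl (_, path, total, current) =>
    if pvG graph current start == NO_EDGE then (path, none)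
    else (path ++ [(start : Int)], some (total + pvG graph current start))

def modified_nearest_neighbor_two_step (graph : List (List Int)) (NO_EDGE : Int) :
    Option (List Int) × Option Int :=
  (List.range graph.length).foldl (fun best start =>
    let r := pvNnA graph start NO_EDGE
    match r.2, best.2 with
    | some tc, none => (some r.1, some tc)
    | some tc, some bt => if tc < bt then (some r.1, some tc) else best
    | none, _ => best) (none, none)

-- ===== PORT B =====
-- candidate list of one recursion level: (value, j) for each reachable unvisited j
def pvCandsB (graph : List (List Int)) (NO_EDGE : Int) (cur : Nat) (U : List Nat) :
    List (Int × Nat) :=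
  U.filterMap (fun j =>
    if pvG graph cur j != NO_EDGE then
      some ((if U.length == 1 then pvG graph cur j
             else pvG graph cur j + PySem.List.minD
               ((U.filter (fun k => (k != j) && (pvG graph j k != NO_EDGE))).map
                 (fun k => pvG graph j k)) (fun x => x) NO_EDGE), j)
    else none)

-- recursive tour over the shrinking unvisited list (fuel = list length, for termination only)
def pvTourB (graph : List (List Int)) (NO_EDGE : Int) (start : Nat) :
    Nat → Nat → List Nat → Option (List Int × Int)
  | _, cur, [] =>
      if pvG graph cur start != NO_EDGE then some ([(start : Int)], pvG graph cur start)
      else none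
  | 0, _, _ :: _ => none
  | fuel + 1, cur, u :: us =>
      match PySem.List.min? (pvCandsB graph NO_EDGE cur (u :: us)) (fun c => c.1) with
      | none => none
      | some c =>
        match pvTourB graph NO_EDGE start fuel c.2 ((u :: us).filter (fun k => k != c.2)) with
        | none => none
        | some pt => some ((c.2 : Int) :: pt.1, pvG graph cur c.2 + pt.2)

def modified_nearest_neighbor_two_step_alt (graph : List (List Int)) (NO_EDGE : Int) :
    Option (List Int) × Option Int :=
  let n := graph.length
  let results := (List.range n).filterMap (fun s =>
    match pvTourB graph NO_EDGE s (n - 1) s ((List.range n).filter (fun j => j != s)) with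
    | none => none
    | some pt => some (pt.2, (s : Int) :: pt.1))
  match PySem.List.min? results (fun c => c.1) with
  | none => (none, none)
  | some c => (some c.2, some c.1)

-- ===== PRECONDITION & SPEC =====
-- Pre_ excludes graphs with a row shorter than the node count, on which Python A's
-- matrix indexing graph[i][j] can raise IndexError (on a few such inputs every short
-- row happens to escape the out-of-range index and A still returns; Pre_ keeps the
-- natural square-matrix shape).
def Pre_modified_nearest_neighbor_two_step (graph : List (List Int)) (NO_EDGE : Int) : Prop :=
  ∀ row ∈ graph, graph.length ≤ row.length
instance (graph : List (List Int)) (NO_EDGE : Int) : Decidable (Pre_modified_nearest_neighbor_two_step graph NO_EDGE) := by unfold Pre_modified_nearest_neighbor_two_step; infer_instance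
def pvWitness_modified_nearest_neighbor_two_step : List (List Int) × Int :=
  ([[0, 1], [1, 0]], 9999)
def Spec_modified_nearest_neighbor_two_step (graph : List (List Int)) (NO_EDGE : Int) (out : Option (List Int) × Option Int) : Prop := out = modified_nearest_neighbor_two_step_alt graph NO_EDGE
instance (graph : List (List Int)) (NO_EDGE : Int) (out : Option (List Int) × Option Int) : Decidable (Spec_modified_nearest_neighbor_two_step graph NO_EDGE out) := by unfold Spec_modified_nearest_neighbor_two_step; infer_instance

-- ===== CLAIM (what is proved, stated in full; the proofs are below) =====
def Claim_equal_modified_nearest_neighbor_two_step : Prop := ∀ (graph : List (List Int)) (NO_EDGE : Int), Dom_modified_nearest_neighbor_two_step graph NO_EDGE → Pre_modified_nearest_neighbor_two_step graph NO_EDGE → Spec_modified_nearest_neighbor_two_step graph NO_EDGE (modified_nearest_neighbor_two_step graph NO_EDGE)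

-- ===== LEMMAS AND PROOFS =====

-- A's per-candidate value, named for the proofs
def pvCvA (graph : List (List Int)) (NO_EDGE : Int) (n : Nat) (visited : List Bool)
    (current j : Nat) : Int :=
  let cost := pvG graph current j
  let remaining := (List.range n).filter (fun k => !(visited.getD k false) && (k != j))
  if remaining = [] then cost
  else cost + (PySem.List.min? ((remaining.filter (fun k => pvG graph j k != NO_EDGE)).map
    (fun k => pvG graph j k)) (fun x => x)).getD NO_EDGE

def pvCandA (graph : List (List Int)) (NO_EDGE : Int) (n : Nat) (visited : List Bool)
    (current : Nat) (j : Nat) : Option (Int × Nat) :=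
  if !(visited.getD j false) && (pvG graph current j != NO_EDGE) then
    some (pvCvA graph NO_EDGE n visited current j, j)
  else none

def pvMinStep {β : Type} (m : Option (Int × β)) (c : Int × β) : Option (Int × β) :=
  match m with
  | none => some c
  | some m0 => if c.1 < m0.1 then some c else some m0

def pvMin3Step (cost : Nat → Int) (acc : Option Nat × Option Int × Option Int)
    (c : Int × Nat) : Option Nat × Option Int × Option Int :=
  match acc.2.1 with
  | none => (some c.2, some c.1, some (cost c.2))
  | some b => if c.1 < b then (some c.2, some c.1, some (cost c.2)) else acc

def pvMin2Step {β : Type} (acc : Option β × Option Int) (c : Int × β) :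
    Option β × Option Int :=
  match acc.2 with
  | none => (some c.2, some c.1)
  | some b => if c.1 < b then (some c.2, some c.1) else acc

lemma pv_min?_eq_foldl {β : Type} (cs : List (Int × β)) :
    PySem.List.min? cs (fun c => c.1) = cs.foldl pvMinStep none := by
  unfold PySem.List.min?
  apply List.foldl_ext
  intro acc c _
  cases acc <;> rfl

lemma pv_min3_rel (cost : Nat → Int) (cs : List (Int × Nat)) :
    ∀ (acc : Option Nat × Option Int × Option Int) (m : Option (Int × Nat)),
      acc.1 = m.map (·.2) → acc.2.1 = m.map (·.1) → acc.2.2 = m.map (fun c => cost c.2) →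
      cs.foldl (pvMin3Step cost) acc
        = ((cs.foldl pvMinStep m).map (·.2), (cs.foldl pvMinStep m).map (·.1),
           (cs.foldl pvMinStep m).map (fun c => cost c.2)) := by
  induction cs with
  | nil =>
    intro acc m h1 h2 h3
    simp only [List.foldl_nil]
    exact Prod.ext h1 (Prod.ext h2 h3)
  | cons c t ih =>
    intro acc m h1 h2 h3
    simp only [List.foldl_cons]
    cases m with
    | none =>
      simp only [Option.map_none] at h1 h2 h3
      apply ih <;> simp [pvMin3Step, pvMinStep, h2]
    | some m0 =>
      simp only [Option.map_some] at h1 h2 h3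
      by_cases hlt : c.1 < m0.1
      · apply ih <;> simp [pvMin3Step, pvMinStep, h2, hlt]
      · apply ih <;> simp [pvMin3Step, pvMinStep, h1, h2, h3, hlt]

lemma pv_min2_rel {β : Type} (cs : List (Int × β)) :
    ∀ (acc : Option β × Option Int) (m : Option (Int × β)),
      acc.1 = m.map (·.2) → acc.2 = m.map (·.1) →
      cs.foldl pvMin2Step acc
        = ((cs.foldl pvMinStep m).map (·.2), (cs.foldl pvMinStep m).map (·.1)) := by
  induction cs with
  | nil =>
    intro acc m h1 h2
    simp only [List.foldl_nil]
    exact Prod.ext h1 h2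
  | cons c t ih =>
    intro acc m h1 h2
    simp only [List.foldl_cons]
    cases m with
    | none =>
      simp only [Option.map_none] at h1 h2
      apply ih <;> simp [pvMin2Step, pvMinStep, h2]
    | some m0 =>
      simp only [Option.map_some] at h1 h2
      by_cases hlt : c.1 < m0.1
      · apply ih <;> simp [pvMin2Step, pvMinStep, h2, hlt]
      · apply ih <;> simp [pvMin2Step, pvMinStep, h1, h2, hlt]

-- A's literal selection fold, re-expressed through pvCandA
lemma pvSelA_eq_cand (graph : List (List Int)) (NO_EDGE : Int) (n : Nat)
    (visited : List Bool) (current : Nat) :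
    pvSelA graph NO_EDGE n visited current
      = ((List.range n).filterMap (pvCandA graph NO_EDGE n visited current)).foldl
          (pvMin3Step (pvG graph current)) (none, none, none) := by
  unfold pvSelA
  rw [List.foldl_filterMap]
  apply List.foldl_ext
  intro acc j _
  by_cases h : (!(visited.getD j false) && (pvG graph current j != NO_EDGE)) = true
  · simp only [pvCandA, pvCvA, pvMin3Step, h, if_pos]
  · have h' : (!(visited.getD j false) && (pvG graph current j != NO_EDGE)) = false :=
      Bool.not_eq_true _ ▸ Bool.eq_false_iff.mpr (fun hc => h hc)
    simp only [pvCandA, pvCvA, h', Bool.false_eq_true, if_false]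

lemma pv_filter_ne_nil_iff (U : List Nat) (j : Nat) (hnd : U.Nodup) (hj : j ∈ U) :
    (U.filter (fun k => k != j) = []) ↔ U.length = 1 := by
  constructor
  · intro h
    have hall : ∀ k ∈ U, k = j := by
      intro k hk
      by_contra hne
      have hmem : k ∈ U.filter (fun k => k != j) :=
        List.mem_filter.mpr ⟨hk, by simp [hne]⟩
      rw [h] at hmem
      simp at hmem
    have hrep := List.eq_replicate_of_mem hall
    rw [hrep] at hnd
    have hle := List.nodup_replicate.mp hnd
    have hge : 1 ≤ U.length := List.length_pos_of_mem hj
    omega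
  · intro h
    rcases U with _ | ⟨a, t⟩
    · simp at hj
    · rcases t with _ | ⟨b, t'⟩
      · simp at hj
        simp [hj]
      · simp at h

lemma pv_length_filter_ne (U : List Nat) (j : Nat) (hnd : U.Nodup) (hj : j ∈ U) :
    (U.filter (fun k => k != j)).length = U.length - 1 := by
  rw [← List.Nodup.erase_eq_filter hnd j]
  exact List.length_erase_of_mem hj

-- A's candidate list over all indices equals B's candidate list over the unvisited list
lemma pv_cands_eq (graph : List (List Int)) (NO_EDGE : Int) (n : Nat)
    (visited : List Bool) (current : Nat) :
    (List.range n).filterMap (pvCandA graph NO_EDGE n visited current)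
      = pvCandsB graph NO_EDGE current
          ((List.range n).filter (fun k => !(visited.getD k false))) := by
  unfold pvCandsB
  rw [List.filterMap_filter]
  apply List.filterMap_congr
  intro j hj
  simp only [pvCandA, pvCvA]
  by_cases hv : visited.getD j false = true
  · have c1 : ¬((!(visited.getD j false) && (pvG graph current j != NO_EDGE)) = true) := by
      rw [hv]; simp
    have c2 : ¬((!(visited.getD j false)) = true) := by rw [hv]; simp
    rw [if_neg c1, if_neg c2]
  · have hv' : visited.getD j false = false := Bool.eq_false_iff.mpr hv
    have c2 : (!(visited.getD j false)) = true := by rw [hv']; rfl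
    have hjU : j ∈ (List.range n).filter (fun k => !(visited.getD k false)) :=
      List.mem_filter.mpr ⟨hj, c2⟩
    have hnd : ((List.range n).filter (fun k => !(visited.getD k false))).Nodup :=
      List.Nodup.filter _ List.nodup_range
    have hrem : (List.range n).filter (fun k => !(visited.getD k false) && (k != j))
        = ((List.range n).filter (fun k => !(visited.getD k false))).filter
            (fun k => k != j) := by
      rw [List.filter_filter]
      apply List.filter_congr
      intro k _
      exact (Bool.and_comm _ _).symm
    have hone := pv_filter_ne_nil_iff _ j hnd hjU
    by_cases he : (pvG graph current j != NO_EDGE) = true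
    · have c1 : (!(visited.getD j false) && (pvG graph current j != NO_EDGE)) = true := by
        rw [hv', he]; rfl
      rw [if_pos c1, if_pos c2, if_pos he, hrem]
      by_cases h1 : ((List.range n).filter (fun k => !(visited.getD k false))).length = 1
      · have e1 : ((List.range n).filter (fun k => !(visited.getD k false))).filter
            (fun k => k != j) = [] := hone.mpr h1
        have e2 : ((((List.range n).filter (fun k => !(visited.getD k false))).length == 1))
            = true := by rw [h1]; rfl
        rw [if_pos e1, if_pos e2]
      · have e1 : ¬(((List.range n).filter (fun k => !(visited.getD k false))).filter
            (fun k => k != j) = []) := fun h => h1 (hone.mp h)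
        have e2 : ¬(((((List.range n).filter (fun k => !(visited.getD k false))).length == 1))
            = true) := by
          simp only [Nat.beq_eq_true_eq]
          exact h1
        rw [if_neg e1, if_neg e2, List.filter_filter]
        have hflip : (((List.range n).filter (fun k => !(visited.getD k false))).filter
              (fun a => (pvG graph j a != NO_EDGE) && (a != j)))
            = (((List.range n).filter (fun k => !(visited.getD k false))).filter
              (fun k => (k != j) && (pvG graph j k != NO_EDGE))) := by
          apply List.filter_congr
          intro k _
          exact Bool.and_comm _ _
        rw [hflip]
        simp [PySem.List.minD]
    · have c1 : ¬((!(visited.getD j false) && (pvG graph current j != NO_EDGE)) = true) := by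
        rw [hv']
        simpa using he
      rw [if_neg c1, if_pos c2, if_neg he]

-- the selection loop characterised by the first minimum of B's candidate list
lemma pvSelA_min (graph : List (List Int)) (NO_EDGE : Int) (n : Nat)
    (visited : List Bool) (current : Nat) :
    pvSelA graph NO_EDGE n visited current
      = (match PySem.List.min? (pvCandsB graph NO_EDGE current
            ((List.range n).filter (fun k => !(visited.getD k false)))) (fun c => c.1) with
         | none => (none, none, none)
         | some c => (some c.2, some c.1, some (pvG graph current c.2))) := by
  rw [pvSelA_eq_cand, pv_cands_eq]
  rw [pv_min3_rel (pvG graph current) _ (none, none, none) none rfl rfl rfl]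
  rw [pv_min?_eq_foldl]
  cases (pvCandsB graph NO_EDGE current
      ((List.range n).filter (fun k => !(visited.getD k false)))).foldl pvMinStep none <;> rfl

-- A's fold over range (n-1), as pure iteration (the index is ignored)
def pvIterA (graph : List (List Int)) (NO_EDGE : Int) (n : Nat) :
    Nat → ((List Bool × List Int × Int × Nat) ⊕ List Int) →
    ((List Bool × List Int × Int × Nat) ⊕ List Int)
  | 0, s => s
  | m + 1, s => pvIterA graph NO_EDGE n m (pvStepA graph NO_EDGE n s 0)

lemma pv_foldl_eq_iter (graph : List (List Int)) (NO_EDGE : Int) (n : Nat)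
    (l : List Nat) (s : (List Bool × List Int × Int × Nat) ⊕ List Int) :
    l.foldl (pvStepA graph NO_EDGE n) s = pvIterA graph NO_EDGE n l.length s := by
  induction l generalizing s with
  | nil => rfl
  | cons i t ih =>
    simp only [List.foldl_cons, List.length_cons]
    have hstep : pvStepA graph NO_EDGE n s i = pvStepA graph NO_EDGE n s 0 := by
      cases s <;> rfl
    rw [hstep]
    exact ih _

lemma pv_iterA_inr (graph : List (List Int)) (NO_EDGE : Int) (n m : Nat) (p : List Int) :
    pvIterA graph NO_EDGE n m (.inr p) = .inr p := by
  induction m with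
  | zero => rfl
  | succ m ih => exact ih

-- A's epilogue after the step loop
def pvEpi (graph : List (List Int)) (NO_EDGE : Int) (start : Nat)
    (s : (List Bool × List Int × Int × Nat) ⊕ List Int) : List Int × Option Int :=
  match s with
  | .inr p => (p, none)
  | .inl (_, path, total, current) =>
    if pvG graph current start == NO_EDGE then (path, none)
    else (path ++ [(start : Int)], some (total + pvG graph current start))

lemma pvNnA_eq_epi (graph : List (List Int)) (NO_EDGE : Int) (start : Nat) :
    pvNnA graph start NO_EDGE
      = pvEpi graph NO_EDGE start (pvIterA graph NO_EDGE graph.length (graph.length - 1)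
          (.inl ((List.replicate graph.length false).set start true, [(start : Int)], 0, start))) := by
  show (match
      (List.range (graph.length - 1)).foldl (pvStepA graph NO_EDGE graph.length)
        (Sum.inl ((List.replicate graph.length false).set start true, [(start : Int)], 0, start)) with
    | Sum.inr p => (p, none)
    | Sum.inl (_, path, total, current) =>
      if (pvG graph current start == NO_EDGE) = true then (path, none)
      else (path ++ [(start : Int)], some (total + pvG graph current start))) = _
  rw [pv_foldl_eq_iter, List.length_range]
  rfl

-- visiting j updates the unvisited list by filtering j out
lemma pv_filter_set (n : Nat) (visited : List Bool) (j : Nat)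
    (hlen : visited.length = n) (hj : j < n) :
    (List.range n).filter (fun k => !((visited.set j true).getD k false))
      = ((List.range n).filter (fun k => !(visited.getD k false))).filter
          (fun k => k != j) := by
  rw [List.filter_filter]
  apply List.filter_congr
  intro k hk
  have hkn : k < n := List.mem_range.mp hk
  by_cases hkj : j = k
  · subst hkj
    have hg : ((visited.set j true).getD j false) = true := by
      rw [List.getD_eq_getElem?_getD, List.getElem?_set, if_pos rfl,
        if_pos (by rw [hlen]; exact hj)]
      rfl
    rw [hg]
    simp
  · have hg : ((visited.set j true).getD k false) = visited.getD k false := by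
      rw [List.getD_eq_getElem?_getD, List.getElem?_set, if_neg hkj,
        ← List.getD_eq_getElem?_getD]
    have hb : (k != j) = true := bne_iff_ne.mpr (Ne.symm hkj)
    rw [hg, hb, Bool.true_and]

-- core: A's remaining iteration vs B's recursion, related step by step
lemma pv_tour_core (graph : List (List Int)) (NO_EDGE : Int) (start : Nat) :
    ∀ (m : Nat) (visited : List Bool) (path : List Int) (total : Int) (current : Nat),
      visited.length = graph.length →
      ((List.range graph.length).filter (fun k => !(visited.getD k false))).length = m →
      (pvEpi graph NO_EDGE start (pvIterA graph NO_EDGE graph.length m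
          (.inl (visited, path, total, current)))).2
        = (pvTourB graph NO_EDGE start m current
            ((List.range graph.length).filter (fun k => !(visited.getD k false)))).map
            (fun pt => total + pt.2)
      ∧ ∀ p t, pvTourB graph NO_EDGE start m current
            ((List.range graph.length).filter (fun k => !(visited.getD k false))) = some (p, t) →
          (pvEpi graph NO_EDGE start (pvIterA graph NO_EDGE graph.length m
              (.inl (visited, path, total, current)))).1 = path ++ p := by
  intro m
  induction m with
  | zero =>
    intro visited path total current hlen hU
    have hnil : (List.range graph.length).filter (fun k => !(visited.getD k false)) = [] :=
      List.length_eq_zero_iff.mp hU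
    rw [hnil]
    constructor
    · show (pvEpi graph NO_EDGE start (.inl (visited, path, total, current))).2 = _
      simp only [pvEpi, pvTourB]
      by_cases hw : pvG graph current start = NO_EDGE
      · simp [hw]
      · simp [hw]
    · intro p t hpt
      simp only [pvTourB] at hpt
      by_cases hw : pvG graph current start = NO_EDGE
      · simp [hw] at hpt
      · rw [if_pos (bne_iff_ne.mpr hw)] at hpt
        have hp : p = [(start : Int)] :=
          (congrArg Prod.fst (Option.some.inj hpt)).symm
        show (pvEpi graph NO_EDGE start (.inl (visited, path, total, current))).1 = path ++ p
        simp only [pvEpi]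
        rw [if_neg (by simpa using hw), hp]
  | succ m ih =>
    intro visited path total current hlen hU
    obtain ⟨u, us, hUeq⟩ : ∃ u us,
        (List.range graph.length).filter (fun k => !(visited.getD k false)) = u :: us := by
      cases hU' : (List.range graph.length).filter (fun k => !(visited.getD k false)) with
      | nil => rw [hU'] at hU; simp at hU
      | cons a l => exact ⟨a, l, rfl⟩
    cases hm : PySem.List.min? (pvCandsB graph NO_EDGE current
        ((List.range graph.length).filter (fun k => !(visited.getD k false)))) (fun c => c.1) with
    | none =>
      have hstep : pvStepA graph NO_EDGE graph.length
          (.inl (visited, path, total, current)) 0 = .inr path := by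
        show (match pvSelA graph NO_EDGE graph.length visited current with
              | (none, _, _) => (Sum.inr path : (List Bool × List Int × Int × Nat) ⊕ List Int)
              | (some c, _, cc) => Sum.inl (visited.set c true, path ++ [(c : Int)],
                  total + cc.getD 0, c)) = _
        rw [pvSelA_min, hm]
      have hm' : PySem.List.min? (pvCandsB graph NO_EDGE current (u :: us)) (fun c => c.1)
          = none := by rw [← hUeq]; exact hm
      have hB : pvTourB graph NO_EDGE start (m + 1) current
          ((List.range graph.length).filter (fun k => !(visited.getD k false))) = none := by
        rw [hUeq]
        simp only [pvTourB]
        rw [hm']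
      rw [hB]
      simp only [pvIterA, hstep, pv_iterA_inr]
      constructor
      · rfl
      · intro p t hpt
        simp at hpt
    | some c =>
      have hc2U : c.2 ∈ (List.range graph.length).filter (fun k => !(visited.getD k false)) := by
        obtain ⟨j0, hj0U, hj0⟩ := List.mem_filterMap.mp (PySem.List.min?_mem hm)
        by_cases hedge : (pvG graph current j0 != NO_EDGE) = true
        · rw [if_pos hedge] at hj0
          have h2 := congrArg Prod.snd (Option.some.inj hj0)
          rw [← h2]
          exact hj0U
        · rw [if_neg hedge] at hj0
          exact absurd hj0 (by simp)
      have hc2n : c.2 < graph.length :=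
        List.mem_range.mp (List.mem_filter.mp hc2U).1
      have hstep : pvStepA graph NO_EDGE graph.length
          (.inl (visited, path, total, current)) 0
          = .inl (visited.set c.2 true, path ++ [(c.2 : Int)],
              total + pvG graph current c.2, c.2) := by
        show (match pvSelA graph NO_EDGE graph.length visited current with
              | (none, _, _) => (Sum.inr path : (List Bool × List Int × Int × Nat) ⊕ List Int)
              | (some c, _, cc) => Sum.inl (visited.set c true, path ++ [(c : Int)],
                  total + cc.getD 0, c)) = _
        rw [pvSelA_min, hm]
        rfl
      have hlen' : (visited.set c.2 true).length = graph.length := by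
        rw [List.length_set]; exact hlen
      have hUnew : (List.range graph.length).filter
            (fun k => !((visited.set c.2 true).getD k false))
          = ((List.range graph.length).filter (fun k => !(visited.getD k false))).filter
              (fun k => k != c.2) :=
        pv_filter_set graph.length visited c.2 hlen hc2n
      have hndU : ((List.range graph.length).filter (fun k => !(visited.getD k false))).Nodup :=
        List.Nodup.filter _ List.nodup_range
      have hlennew : (((List.range graph.length).filter
            (fun k => !(visited.getD k false))).filter (fun k => k != c.2)).length = m := by
        rw [pv_length_filter_ne _ c.2 hndU hc2U, hU]
        omega
      obtain ⟨IH1, IH2⟩ := ih (visited.set c.2 true) (path ++ [(c.2 : Int)])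
        (total + pvG graph current c.2) c.2 hlen' (by rw [hUnew]; exact hlennew)
      rw [hUnew] at IH1 IH2
      have hm' : PySem.List.min? (pvCandsB graph NO_EDGE current (u :: us)) (fun c => c.1)
          = some c := by rw [← hUeq]; exact hm
      have hB : pvTourB graph NO_EDGE start (m + 1) current
          ((List.range graph.length).filter (fun k => !(visited.getD k false)))
          = (match pvTourB graph NO_EDGE start m c.2
              (((List.range graph.length).filter (fun k => !(visited.getD k false))).filter
                (fun k => k != c.2)) with
             | none => none
             | some pt => some ((c.2 : Int) :: pt.1, pvG graph current c.2 + pt.2)) := by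
        conv_lhs => rw [hUeq]
        simp only [pvTourB]
        rw [hm', ← hUeq]
      rw [hB]
      simp only [pvIterA, hstep]
      constructor
      · rw [IH1]
        cases hr : pvTourB graph NO_EDGE start m c.2
            (((List.range graph.length).filter (fun k => !(visited.getD k false))).filter
              (fun k => k != c.2)) with
        | none => rfl
        | some pt => simp [add_assoc]
      · intro p t hpt
        cases hr : pvTourB graph NO_EDGE start m c.2
            (((List.range graph.length).filter (fun k => !(visited.getD k false))).filter
              (fun k => k != c.2)) with
        | none => rw [hr] at hpt; simp at hpt
        | some pt =>
          rw [hr] at hpt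
          have hp : p = (c.2 : Int) :: pt.1 :=
            (congrArg Prod.fst (Option.some.inj hpt)).symm
          rw [IH2 pt.1 pt.2 (by rw [hr]), hp, List.append_assoc, List.singleton_append]


-- per start: A's tour characterised by B's recursive tour
lemma pv_nnA_char (graph : List (List Int)) (NO_EDGE : Int) (s : Nat)
    (hs : s < graph.length) :
    (pvNnA graph s NO_EDGE).2
        = (pvTourB graph NO_EDGE s (graph.length - 1) s
            ((List.range graph.length).filter (fun j => j != s))).map (·.2)
      ∧ ∀ p t, pvTourB graph NO_EDGE s (graph.length - 1) s
            ((List.range graph.length).filter (fun j => j != s)) = some (p, t) →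
          (pvNnA graph s NO_EDGE).1 = (s : Int) :: p := by
  have hrep : (List.range graph.length).filter
        (fun k => !((List.replicate graph.length false).getD k false)) = List.range graph.length := by
    apply List.filter_eq_self.mpr
    intro a ha
    rw [List.getD_eq_getElem?_getD, List.getElem?_replicate,
      if_pos (List.mem_range.mp ha)]
    rfl
  have hU0 : (List.range graph.length).filter
        (fun k => !(((List.replicate graph.length false).set s true).getD k false))
      = (List.range graph.length).filter (fun j => j != s) := by
    rw [pv_filter_set graph.length (List.replicate graph.length false) s
      (List.length_replicate) hs, hrep]
  have hlen' : (((List.replicate graph.length false).set s true)).length = graph.length := by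
    rw [List.length_set, List.length_replicate]
  have hlen0 : ((List.range graph.length).filter (fun j => j != s)).length
      = graph.length - 1 := by
    rw [pv_length_filter_ne _ s List.nodup_range (List.mem_range.mpr hs),
      List.length_range]
  obtain ⟨H1, H2⟩ := pv_tour_core graph NO_EDGE s (graph.length - 1)
    ((List.replicate graph.length false).set s true) [(s : Int)] 0 s hlen'
    (by rw [hU0]; exact hlen0)
  rw [hU0] at H1 H2
  rw [pvNnA_eq_epi]
  constructor
  · rw [H1]
    cases pvTourB graph NO_EDGE s (graph.length - 1) s
        ((List.range graph.length).filter (fun j => j != s)) <;> simp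
  · intro p t hpt
    rw [H2 p t hpt]
    rfl

def pvCandOut (graph : List (List Int)) (NO_EDGE : Int) (s : Nat) :
    Option (Int × List Int) :=
  match (pvNnA graph s NO_EDGE).2 with
  | none => none
  | some t => some (t, (pvNnA graph s NO_EDGE).1)

lemma pv_modified_eq_cand (graph : List (List Int)) (NO_EDGE : Int) :
    modified_nearest_neighbor_two_step graph NO_EDGE
      = (fun m => (m.map (·.2), m.map (·.1)))
          (((List.range graph.length).filterMap (pvCandOut graph NO_EDGE)).foldl
            pvMinStep none) := by
  have h1 : modified_nearest_neighbor_two_step graph NO_EDGE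
      = (List.range graph.length).foldl (fun best s =>
          match pvCandOut graph NO_EDGE s with
          | some c => pvMin2Step best c
          | none => best) (none, none) := by
    unfold modified_nearest_neighbor_two_step
    apply List.foldl_ext
    intro acc s _
    unfold pvCandOut pvMin2Step
    cases h1 : (pvNnA graph s NO_EDGE).2 with
    | none => simp only [h1]
    | some tc => cases h2 : acc.2 <;> simp only [h1, h2]
  have h2 : ((List.range graph.length).filterMap (pvCandOut graph NO_EDGE)).foldl
        pvMin2Step (none, none)
      = (List.range graph.length).foldl (fun best s =>
          match pvCandOut graph NO_EDGE s with
          | some c => pvMin2Step best c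
          | none => best) (none, none) := by
    rw [List.foldl_filterMap]
    apply List.foldl_ext
    intro acc x _
    cases pvCandOut graph NO_EDGE x <;> rfl
  rw [h1, ← h2]
  rw [pv_min2_rel _ (none, none) none rfl rfl]

-- ===== VERDICT (by name: the statement is the Claim_ definition above) =====
theorem modified_nearest_neighbor_two_step_spec : Claim_equal_modified_nearest_neighbor_two_step := by
  intro graph NO_EDGE _ _
  unfold Spec_modified_nearest_neighbor_two_step
  rw [pv_modified_eq_cand]
  have hlist : (List.range graph.length).filterMap (pvCandOut graph NO_EDGE)
      = (List.range graph.length).filterMap (fun s =>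
          match pvTourB graph NO_EDGE s (graph.length - 1) s
              ((List.range graph.length).filter (fun j => j != s)) with
          | none => none
          | some pt => some (pt.2, (s : Int) :: pt.1)) := by
    apply List.filterMap_congr
    intro s hs
    obtain ⟨C1, C2⟩ := pv_nnA_char graph NO_EDGE s (List.mem_range.mp hs)
    unfold pvCandOut
    cases hr : pvTourB graph NO_EDGE s (graph.length - 1) s
        ((List.range graph.length).filter (fun j => j != s)) with
    | none =>
      rw [hr] at C1
      simp only [Option.map_none] at C1
      rw [C1]
    | some pt =>
      rw [hr] at C1
      simp only [Option.map_some] at C1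
      rw [C1, C2 pt.1 pt.2 (by rw [hr])]
  rw [hlist]
  show _ = (match PySem.List.min? ((List.range graph.length).filterMap (fun s =>
      match pvTourB graph NO_EDGE s (graph.length - 1) s
          ((List.range graph.length).filter (fun j => j != s)) with
      | none => none
      | some pt => some (pt.2, (s : Int) :: pt.1))) (fun c => c.1) with
    | none => (none, none)
    | some c => (some c.2, some c.1))
  rw [pv_min?_eq_foldl]
  cases ((List.range graph.length).filterMap (fun s =>
      match pvTourB graph NO_EDGE s (graph.length - 1) s
          ((List.range graph.length).filter (fun j => j != s)) with
      | none => none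
      | some pt => some (pt.2, (s : Int) :: pt.1))).foldl pvMinStep none <;> rfl
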